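-- pv_equiv track=rewrite | github.com/laha0006/AdventOfCode2023 | 3/3.py | get_list_of_numbers_represented_as_list_of_tuples_of_coordinates
-- ===== SOURCE A (Python) =====
-- def get_list_of_numbers_represented_as_list_of_tuples_of_coordinates(lines_input):
--     numbers = []
--     number = []
--     line_count = 0
--     for line in lines_input:
--         number_found = False
--         char_count = 0
--         for c in line:
--             if c.isnumeric() and not number_found:
--                 number.append((line_count, char_count))
--                 char_count += 1
--                 number_found = True
--             elif c.isnumeric() and number_found:
--                 number.append((line_count, char_count))
--                 char_count += 1
--             elif not c.isnumeric() and number_found: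
--                 numbers.append(number.copy())
--                 number.clear()
--                 number_found = False
--                 char_count += 1
--             else:
--                 char_count += 1
--         if number_found:
--             numbers.append(number.copy())
--             number.clear()
--         line_count += 1
--     return numbers
-- ===== SOURCE B (Python) =====
-- def get_list_of_numbers_represented_as_list_of_tuples_of_coordinates(lines_input):
--     numbers = []
--     for row, line in enumerate(lines_input):
--         n = len(line)
--         col = 0
--         while col < n:
--             if line[col].isnumeric():
--                 start = col
--                 while col < n and line[col].isnumeric():
--                     col += 1
--                 numbers.append([(row, c) for c in range(start, col)])
--             else:
--                 col += 1
--     return numbers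
-- ===== Notes on version B (the rewrite author's own statement) =====
-- stated objective: simpler
-- what changed: Replaces the number_found flag with copy/clear flushing of a shared accumulator by a direct scan that finds each maximal digit run and emits its coordinate list in one comprehension.
import Mathlib
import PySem

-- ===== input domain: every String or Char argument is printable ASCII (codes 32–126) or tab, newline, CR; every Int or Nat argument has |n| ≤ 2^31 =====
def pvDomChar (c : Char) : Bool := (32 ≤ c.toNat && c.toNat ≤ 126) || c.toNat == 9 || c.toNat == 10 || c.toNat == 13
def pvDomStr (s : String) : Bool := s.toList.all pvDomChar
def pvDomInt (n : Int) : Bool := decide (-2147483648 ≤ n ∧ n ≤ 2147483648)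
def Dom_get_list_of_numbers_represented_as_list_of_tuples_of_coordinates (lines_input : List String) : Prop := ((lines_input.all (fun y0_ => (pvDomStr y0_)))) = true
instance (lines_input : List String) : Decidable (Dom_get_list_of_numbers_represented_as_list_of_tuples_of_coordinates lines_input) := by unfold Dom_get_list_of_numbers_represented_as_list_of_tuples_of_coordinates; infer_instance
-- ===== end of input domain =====

-- B replaces A's number_found flag and copy/clear accumulator flushing by a direct
-- scan that emits each maximal digit run as one coordinate list (objective: simpler).

-- ===== PORT A =====
-- state = (numbers, number, char_count, number_found); c.isnumeric() ported as
-- PySem.Chars.isdigit, exact on the printable-ASCII Dom (isnumeric = isdigit on ASCII).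
def pvAInner (row : Int) : List Char →
    (List (List (Int × Int)) × List (Int × Int) × Int × Bool) →
    (List (List (Int × Int)) × List (Int × Int) × Int × Bool)
  | [], st => st
  | c :: cs, (numbers, number, col, found) =>
    if PySem.Chars.isdigit c && !found then
      pvAInner row cs (numbers, number ++ [(row, col)], col + 1, true)
    else if PySem.Chars.isdigit c && found then
      pvAInner row cs (numbers, number ++ [(row, col)], col + 1, true)
    else if !(PySem.Chars.isdigit c) && found then
      pvAInner row cs (numbers ++ [number], [], col + 1, false)
    else
      pvAInner row cs (numbers, number, col + 1, false)

-- the "if number_found: numbers.append(number.copy()); number.clear()" at line end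
def pvAFlush (st : List (List (Int × Int)) × List (Int × Int) × Int × Bool) :
    List (List (Int × Int)) × List (Int × Int) :=
  if st.2.2.2 then (st.1 ++ [st.2.1], []) else (st.1, st.2.1)

def pvAOuter : List String → Int → (List (List (Int × Int)) × List (Int × Int)) →
    (List (List (Int × Int)) × List (Int × Int))
  | [], _, st => st
  | l :: ls, line_count, (numbers, number) =>
    pvAOuter ls (line_count + 1) (pvAFlush (pvAInner line_count l.toList (numbers, number, 0, false)))

def get_list_of_numbers_represented_as_list_of_tuples_of_coordinates (lines_input : List String) : List (List (Int × Int)) :=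
  (pvAOuter lines_input 0 ([], [])).1

-- ===== PORT B =====
-- [(row, c) for c in range(start, col)]  where col - start = len
def pvRunCoords (row start : Int) (len : Nat) : List (Int × Int) :=
  (List.range len).map (fun i => (row, start + (i : Int)))

-- the while loop over one line: skip a non-digit, or consume a maximal digit run
def pvBScan (row : Int) (col : Int) : List Char → List (List (Int × Int))
  | [] => []
  | c :: cs =>
    if PySem.Chars.isdigit c then
      let k := (cs.takeWhile PySem.Chars.isdigit).length
      pvRunCoords row col (k + 1) :: pvBScan row (col + (k : Int) + 1) (cs.dropWhile PySem.Chars.isdigit)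
    else
      pvBScan row (col + 1) cs
  termination_by cs => cs.length
  decreasing_by
  · simpa using Nat.lt_succ_of_le (List.length_dropWhile_le _ _)
  · simp

def pvBOuter (row : Int) : List String → List (List (Int × Int))
  | [] => []
  | l :: ls => pvBScan row 0 l.toList ++ pvBOuter (row + 1) ls

def get_list_of_numbers_represented_as_list_of_tuples_of_coordinates_alt (lines_input : List String) : List (List (Int × Int)) :=
  pvBOuter 0 lines_input

-- ===== PRECONDITION & SPEC =====
def Spec_get_list_of_numbers_represented_as_list_of_tuples_of_coordinates (lines_input : List String) (out : List (List (Int × Int))) : Prop := out = get_list_of_numbers_represented_as_list_of_tuples_of_coordinates_alt lines_input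
instance (lines_input : List String) (out : List (List (Int × Int))) : Decidable (Spec_get_list_of_numbers_represented_as_list_of_tuples_of_coordinates lines_input out) := by unfold Spec_get_list_of_numbers_represented_as_list_of_tuples_of_coordinates; infer_instance

-- ===== CLAIM (what is proved, stated in full; the proofs are below) =====
def Claim_equal_get_list_of_numbers_represented_as_list_of_tuples_of_coordinates : Prop := ∀ (lines_input : List String), Dom_get_list_of_numbers_represented_as_list_of_tuples_of_coordinates lines_input → Spec_get_list_of_numbers_represented_as_list_of_tuples_of_coordinates lines_input (get_list_of_numbers_represented_as_list_of_tuples_of_coordinates lines_input)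

-- ===== LEMMAS AND PROOFS =====

lemma pvRunCoords_snoc (row start : Int) (k : Nat) :
    pvRunCoords row start (k + 1) = pvRunCoords row start k ++ [(row, start + (k : Int))] := by
  simp [pvRunCoords, List.range_succ]

lemma pvRunCoords_succ (row start : Int) (k : Nat) :
    pvRunCoords row start (k + 1) = (row, start) :: pvRunCoords row (start + 1) k := by
  induction k generalizing start with
  | zero => simp [pvRunCoords]
  | succ k ih =>
    rw [pvRunCoords_snoc, ih, pvRunCoords_snoc]
    simp [Prod.ext_iff]
    ring

-- the core invariant: flushing A's inner loop yields B's run decomposition,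
-- both from a fresh state and with a pending run p
lemma pvKey : ∀ (n : Nat) (cs : List Char), cs.length ≤ n →
    (∀ (row : Int) (numbers : List (List (Int × Int))) (col : Int),
      pvAFlush (pvAInner row cs (numbers, [], col, false)) = (numbers ++ pvBScan row col cs, [])) ∧
    (∀ (row : Int) (numbers : List (List (Int × Int))) (p : List (Int × Int)) (col : Int),
      pvAFlush (pvAInner row cs (numbers, p, col, true)) =
        (numbers ++ (p ++ pvRunCoords row col (cs.takeWhile PySem.Chars.isdigit).length)
            :: pvBScan row (col + ((cs.takeWhile PySem.Chars.isdigit).length : Int)) (cs.dropWhile PySem.Chars.isdigit), [])) := by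
  intro n
  induction n with
  | zero =>
    intro cs hcs
    have : cs = [] := List.eq_nil_of_length_eq_zero (Nat.le_zero.mp hcs)
    subst this
    constructor
    · intro row numbers col; simp [pvAInner, pvAFlush, pvBScan]
    · intro row numbers p col; simp [pvAInner, pvAFlush, pvBScan, pvRunCoords]
  | succ m ih =>
    intro cs hcs
    match cs with
    | [] =>
      constructor
      · intro row numbers col; simp [pvAInner, pvAFlush, pvBScan]
      · intro row numbers p col; simp [pvAInner, pvAFlush, pvBScan, pvRunCoords]
    | c :: cs =>
      have hlen : cs.length ≤ m := by simpa using Nat.succ_le_succ_iff.mp hcs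
      by_cases hd : PySem.Chars.isdigit c = true
      · constructor
        · intro row numbers col
          rw [show pvAInner row (c :: cs) (numbers, [], col, false)
                = pvAInner row cs (numbers, [(row, col)], col + 1, true) by
              simp [pvAInner, hd]]
          rw [(ih cs hlen).2 row numbers [(row, col)] (col + 1)]
          set k := (cs.takeWhile PySem.Chars.isdigit).length with hk
          simp only [pvBScan, hd, if_pos, ← hk]
          rw [pvRunCoords_succ, show col + 1 + (k : Int) = col + (k : Int) + 1 by ring]
          simp
        · intro row numbers p col
          rw [show pvAInner row (c :: cs) (numbers, p, col, true)
                = pvAInner row cs (numbers, p ++ [(row, col)], col + 1, true) by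
              simp [pvAInner, hd]]
          rw [(ih cs hlen).2 row numbers (p ++ [(row, col)]) (col + 1)]
          set k := (cs.takeWhile PySem.Chars.isdigit).length with hk
          rw [List.takeWhile_cons_of_pos hd, List.dropWhile_cons_of_pos hd]
          simp only [List.length_cons, ← hk, Nat.cast_add, Nat.cast_one]
          rw [pvRunCoords_succ, show col + ((k : Int) + 1) = col + 1 + (k : Int) by ring]
          simp
      · have hd' : PySem.Chars.isdigit c = false := by simpa using hd
        constructor
        · intro row numbers col
          rw [show pvAInner row (c :: cs) (numbers, [], col, false)
                = pvAInner row cs (numbers, [], col + 1, false) by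
              simp [pvAInner, hd']]
          rw [(ih cs hlen).1 row numbers (col + 1)]
          simp [pvBScan, hd']
        · intro row numbers p col
          rw [show pvAInner row (c :: cs) (numbers, p, col, true)
                = pvAInner row cs (numbers ++ [p], [], col + 1, false) by
              simp [pvAInner, hd']]
          rw [(ih cs hlen).1 row (numbers ++ [p]) (col + 1)]
          rw [List.takeWhile_cons_of_neg hd, List.dropWhile_cons_of_neg hd]
          simp [pvBScan, hd', pvRunCoords]

lemma pvOuter_eq : ∀ (ls : List String) (row : Int) (numbers : List (List (Int × Int))),
    (pvAOuter ls row (numbers, [])).1 = numbers ++ pvBOuter row ls := by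
  intro ls
  induction ls with
  | nil => intro row numbers; simp [pvAOuter, pvBOuter]
  | cons l ls ih =>
    intro row numbers
    have h := (pvKey l.toList.length l.toList le_rfl).1 row numbers 0
    simp only [pvAOuter, h, pvBOuter, ih]
    simp

-- ===== VERDICT (by name: the statement is the Claim_ definition above) =====
theorem get_list_of_numbers_represented_as_list_of_tuples_of_coordinates_spec : Claim_equal_get_list_of_numbers_represented_as_list_of_tuples_of_coordinates := by
  intro lines_input _
  show _ = _
  simp [get_list_of_numbers_represented_as_list_of_tuples_of_coordinates,
        get_list_of_numbers_represented_as_list_of_tuples_of_coordinates_alt, pvOuter_eq]
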